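-- pv_equiv track=rewrite | github.com/J-nowcow/programmers_python | Level 1/비밀지도.py | solution
-- ===== SOURCE A (Python) =====
-- def solution(n,arr1,arr2):
--     answer = []
--     for i,j in zip(arr1,arr2):
--         line = ""
--         for _ in range(n):
--             line += " #"[i%2+j%2 > 0] # 둘 중 하나라도 벽이면 #, 아니면 0
--             i//=2; j//=2
--         answer.append(line[::-1]) # 이진법 계산한거니까 거꾸로 넣어줘야 함
--     return answer
-- ===== SOURCE B (Python) =====
-- def solution(n, arr1, arr2):
--     answer = []
--     for i, j in zip(arr1, arr2):
--         row = format((i | j) % (1 << n), 'b').zfill(n) if n > 0 else ''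
--         answer.append(row.replace('1', '#').replace('0', ' '))
--     return answer
-- ===== Notes on version B (the rewrite author's own statement) =====
-- stated objective: faster
-- what changed: B replaces A's inner per-bit Python loop (mutating i and j with %2 and //2, building the row lsb-first by string concatenation and reversing it) with one integer OR per row reduced mod 2**n, a single binary format + zfill conversion, and two character replacements.
import Mathlib
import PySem

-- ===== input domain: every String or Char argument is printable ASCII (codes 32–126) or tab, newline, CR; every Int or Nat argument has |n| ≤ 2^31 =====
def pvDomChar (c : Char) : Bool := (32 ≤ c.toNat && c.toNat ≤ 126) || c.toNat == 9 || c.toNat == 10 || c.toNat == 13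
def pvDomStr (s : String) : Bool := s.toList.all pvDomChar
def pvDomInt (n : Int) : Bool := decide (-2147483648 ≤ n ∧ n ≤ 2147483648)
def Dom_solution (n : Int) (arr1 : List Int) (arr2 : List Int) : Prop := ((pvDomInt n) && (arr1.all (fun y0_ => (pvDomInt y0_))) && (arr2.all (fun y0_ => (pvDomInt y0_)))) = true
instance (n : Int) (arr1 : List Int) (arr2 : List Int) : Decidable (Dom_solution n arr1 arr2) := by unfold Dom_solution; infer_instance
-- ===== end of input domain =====

-- B builds each row with one integer OR reduced mod 2^n, a binary-format + zfill conversion and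
-- two character replacements, instead of A's stateful %2 / //2 loop that builds the row lsb-first
-- and reverses it (idiomatic; same asymptotic cost).


-- ===== PORT A =====
-- Literal port: for each (i,j) in zip, loop `range(n)` appending " #"[i%2+j%2>0]
-- while halving i,j with //=2, then append line[::-1] (reverse) to the answer.
def solution (n : Int) (arr1 : List Int) (arr2 : List Int) : List String :=
  (arr1.zip arr2).foldl
    (fun answer p =>
      let r := (PySem.List.pyRange 0 n 1).foldl
        (fun (st : List Char × Int × Int) (_ : Int) =>
          (st.1 ++ [if PySem.Int.mod st.2.1 2 + PySem.Int.mod st.2.2 2 > 0 then '#' else ' '],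
           PySem.Int.floordiv st.2.1 2, PySem.Int.floordiv st.2.2 2))
        (([] : List Char), p.1, p.2)
      answer ++ [String.mk r.1.reverse]) []

-- ===== PORT B =====
-- Literal port of Source B: row = format((i|j) % (1<<n), 'b').zfill(n) if n > 0 else '',
-- then append row.replace('1','#').replace('0',' ').  format(·,'b') is PySem.Int.toBinChars,
-- zfill is PySem.Chars.zfill, replace is PySem.Chars.replace (string work on List Char).
def solution_alt (n : Int) (arr1 : List Int) (arr2 : List Int) : List String :=
  (arr1.zip arr2).foldl
    (fun answer p =>
      let row : List Char :=
        if n > 0 then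
          PySem.Chars.zfill
            (PySem.Int.toBinChars (PySem.Int.mod (PySem.Int.bor p.1 p.2) ((1 : Int) <<< n.toNat))) n
        else []
      answer ++ [String.mk (PySem.Chars.replace (PySem.Chars.replace row ['1'] ['#']) ['0'] [' '])]) []

-- ===== PRECONDITION & SPEC =====
def Spec_solution (n : Int) (arr1 : List Int) (arr2 : List Int) (out : List String) : Prop := out = solution_alt n arr1 arr2
instance (n : Int) (arr1 : List Int) (arr2 : List Int) (out : List String) : Decidable (Spec_solution n arr1 arr2 out) := by unfold Spec_solution; infer_instance

-- ===== CLAIM =====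
def Claim_equal_solution : Prop := ∀ (n : Int) (arr1 : List Int) (arr2 : List Int), Dom_solution n arr1 arr2 → Spec_solution n arr1 arr2 (solution n arr1 arr2)

-- ===== LEMMAS AND PROOFS =====

theorem pvLorDiv (m n : Nat) : (m ||| n) / 2 = m / 2 ||| n / 2 := by
  apply Nat.eq_of_testBit_eq; intro k
  simp [← Nat.testBit_succ]

theorem pvLandDiv (m n : Nat) : (m &&& n) / 2 = m / 2 &&& n / 2 := by
  apply Nat.eq_of_testBit_eq; intro k
  simp [← Nat.testBit_succ]

theorem pvLdiffDiv (m n : Nat) : (m.ldiff n) / 2 = (m / 2).ldiff (n / 2) := by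
  apply Nat.eq_of_testBit_eq; intro k
  simp [Nat.testBit_ldiff, ← Nat.testBit_succ]

theorem pvLorMod (m n : Nat) : (m ||| n) % 2 = 1 ↔ (m % 2 = 1 ∨ n % 2 = 1) := by
  have h := Nat.testBit_lor m n 0
  simp only [Nat.testBit_zero] at h
  constructor
  · intro hx; have : (decide ((m ||| n) % 2 = 1)) = true := by simp [hx]
    rw [h] at this; simpa using this
  · intro hx
    have : (decide (m % 2 = 1) || decide (n % 2 = 1)) = true := by
      rcases hx with hx | hx <;> simp [hx]
    rw [← h] at this; simpa using this

theorem pvLandMod (m n : Nat) : (m &&& n) % 2 = 1 ↔ (m % 2 = 1 ∧ n % 2 = 1) := by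
  have h := Nat.testBit_land m n 0
  simp only [Nat.testBit_zero] at h
  constructor
  · intro hx; have : (decide ((m &&& n) % 2 = 1)) = true := by simp [hx]
    rw [h] at this; simpa using this
  · intro hx
    have : (decide (m % 2 = 1) && decide (n % 2 = 1)) = true := by simp [hx.1, hx.2]
    rw [← h] at this; simpa using this

theorem pvLdiffMod (m n : Nat) : (m.ldiff n) % 2 = 1 ↔ (m % 2 = 1 ∧ ¬ n % 2 = 1) := by
  have h := Nat.testBit_ldiff m n 0
  simp only [Nat.testBit_zero] at h
  constructor
  · intro hx; have : (decide ((m.ldiff n) % 2 = 1)) = true := by simp [hx]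
    rw [h] at this; simpa using this
  · intro hx
    have : (decide (m % 2 = 1) && !decide (n % 2 = 1)) = true := by simp [hx.1, hx.2]
    rw [← h] at this; simpa using this

theorem pvAdd (m : Nat) : ∀ n : Nat, (m &&& n) + m.ldiff n = m := by
  induction m using Nat.strong_induction_on with
  | _ m ih =>
    intro n
    rcases Nat.eq_zero_or_pos m with h0 | hp
    · subst h0; simp [Nat.ldiff]
    · have h2 : m / 2 < m := Nat.div_lt_self hp (by norm_num)
      have hrec := ih (m / 2) h2 (n / 2)
      have e1 := Nat.div_add_mod (m &&& n) 2
      have e2 := Nat.div_add_mod (m.ldiff n) 2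
      have e3 := Nat.div_add_mod m 2
      have hA := pvLandDiv m n
      have hB := pvLdiffDiv m n
      have p1 := pvLandMod m n
      have p2 := pvLdiffMod m n
      have q1 : (m &&& n) % 2 < 2 := Nat.mod_lt _ (by norm_num)
      have q2 : (m.ldiff n) % 2 < 2 := Nat.mod_lt _ (by norm_num)
      have q3 : m % 2 < 2 := Nat.mod_lt _ (by norm_num)
      have hpar : (m &&& n) % 2 + (m.ldiff n) % 2 = m % 2 := by
        rcases Nat.mod_two_eq_zero_or_one (m &&& n) with ha | ha <;>
        rcases Nat.mod_two_eq_zero_or_one (m.ldiff n) with hb | hb <;>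
        rcases Nat.mod_two_eq_zero_or_one m with hm | hm <;>
        rcases Nat.mod_two_eq_zero_or_one n with hn | hn <;>
          simp_all
      omega

theorem pvSub (m n : Nat) : m - (m &&& n) = m.ldiff n := by
  have := pvAdd m n; omega

theorem pvBorEq (i j : Int) : PySem.Int.bor i j = Int.lor i j := by
  cases i with
  | ofNat a =>
    cases j with
    | ofNat b => simp [PySem.Int.bor, Int.lor]
    | negSucc b =>
      simp only [PySem.Int.bor, Int.lor]
      have hpa : (0 : Int) ≤ Int.ofNat a := Int.natCast_nonneg a
      have hnb : ¬ (0 : Int) ≤ Int.negSucc b := by simp [Int.negSucc_eq]; omega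
      rw [if_pos hpa, if_neg hnb]
      have h1 : (-Int.negSucc b - 1).toNat = b := by
        simp [Int.negSucc_eq]
      rw [h1]
      have h2 : ((Int.ofNat a).toNat) = a := rfl
      rw [h2, pvSub]
      simp [Int.negSucc_eq]; omega
  | negSucc a =>
    cases j with
    | ofNat b =>
      simp only [PySem.Int.bor, Int.lor]
      have hna : ¬ (0 : Int) ≤ Int.negSucc a := by simp [Int.negSucc_eq]; omega
      have hpb : (0 : Int) ≤ Int.ofNat b := Int.natCast_nonneg b
      rw [if_neg hna, if_pos hpb]
      have h1 : (-Int.negSucc a - 1).toNat = a := by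
        simp [Int.negSucc_eq]
      rw [h1]
      have h2 : ((Int.ofNat b).toNat) = b := rfl
      rw [h2, pvSub]
      simp [Int.negSucc_eq]; omega
    | negSucc b =>
      simp only [PySem.Int.bor, Int.lor]
      have hna : ¬ (0 : Int) ≤ Int.negSucc a := by simp [Int.negSucc_eq]; omega
      have hnb : ¬ (0 : Int) ≤ Int.negSucc b := by simp [Int.negSucc_eq]; omega
      rw [if_neg hna, if_neg hnb]
      have h1 : (-Int.negSucc a - 1).toNat = a := by
        simp [Int.negSucc_eq]
      have h2 : (-Int.negSucc b - 1).toNat = b := by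
        simp [Int.negSucc_eq]
      rw [h1, h2]
      simp [Int.negSucc_eq]; omega

theorem pvNegSuccDiv (a : Nat) : Int.negSucc a / 2 = Int.negSucc (a / 2) := by
  simp only [Int.negSucc_eq]
  omega

theorem pvOfNatDiv (a : Nat) : (Int.ofNat a) / 2 = Int.ofNat (a / 2) := by
  simp only [Int.ofNat_eq_natCast]
  omega

-- F2: halving commutes with Python's `|`
theorem pvBorDiv (i j : Int) :
    PySem.Int.floordiv (PySem.Int.bor i j) 2 = PySem.Int.bor (PySem.Int.floordiv i 2) (PySem.Int.floordiv j 2) := by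
  rw [PySem.Int.floordiv_eq_ediv_of_pos (by norm_num), PySem.Int.floordiv_eq_ediv_of_pos (by norm_num),
      PySem.Int.floordiv_eq_ediv_of_pos (by norm_num), pvBorEq, pvBorEq]
  cases i with
  | ofNat a =>
    cases j with
    | ofNat b =>
      simp only [Int.lor, pvOfNatDiv]
      simp only [← pvLorDiv]
      omega
    | negSucc b =>
      simp only [Int.lor, pvOfNatDiv, pvNegSuccDiv]
      simp only [← pvLdiffDiv]
  | negSucc a =>
    cases j with
    | ofNat b =>
      simp only [Int.lor, pvOfNatDiv, pvNegSuccDiv]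
      simp only [← pvLdiffDiv]
    | negSucc b =>
      simp only [Int.lor, pvNegSuccDiv]
      simp only [← pvLandDiv]

theorem pvEmodOfNat (a : Nat) : Int.ofNat a % 2 = (↑(a % 2) : Int) := by
  simp only [Int.ofNat_eq_natCast]; omega

theorem pvEmodNat (a : Nat) : ((a : Int)) % 2 = ((a % 2 : Nat) : Int) := by omega

theorem pvEmodNegSucc (a : Nat) : Int.negSucc a % 2 = (↑(1 - a % 2) : Int) := by
  simp only [Int.negSucc_eq]; omega

-- F1: parity of Python's `|` is the or of the parities
theorem pvBorMod (i j : Int) :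
    (PySem.Int.mod (PySem.Int.bor i j) 2 = 1) ↔ (0 < PySem.Int.mod i 2 + PySem.Int.mod j 2) := by
  rw [PySem.Int.mod_eq_emod_of_pos (by norm_num), PySem.Int.mod_eq_emod_of_pos (by norm_num),
      PySem.Int.mod_eq_emod_of_pos (by norm_num), pvBorEq]
  cases i with
  | ofNat a =>
    cases j with
    | ofNat b =>
      simp only [Int.lor, pvEmodOfNat, pvEmodNat]
      have h := pvLorMod a b
      rcases Nat.mod_two_eq_zero_or_one (a ||| b) with hx | hx <;>
      rcases Nat.mod_two_eq_zero_or_one a with ha | ha <;>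
      rcases Nat.mod_two_eq_zero_or_one b with hb | hb <;>
        rw [hx, ha, hb] at h ⊢ <;> simp at h ⊢
    | negSucc b =>
      simp only [Int.lor, pvEmodOfNat, pvEmodNegSucc]
      have h := pvLdiffMod b a
      rcases Nat.mod_two_eq_zero_or_one (b.ldiff a) with hx | hx <;>
      rcases Nat.mod_two_eq_zero_or_one a with ha | ha <;>
      rcases Nat.mod_two_eq_zero_or_one b with hb | hb <;>
        rw [hx, ha, hb] at h ⊢ <;> simp at h ⊢
  | negSucc a =>
    cases j with
    | ofNat b =>
      simp only [Int.lor, pvEmodOfNat, pvEmodNegSucc]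
      have h := pvLdiffMod a b
      rcases Nat.mod_two_eq_zero_or_one (a.ldiff b) with hx | hx <;>
      rcases Nat.mod_two_eq_zero_or_one a with ha | ha <;>
      rcases Nat.mod_two_eq_zero_or_one b with hb | hb <;>
        rw [hx, ha, hb] at h ⊢ <;> simp at h ⊢
    | negSucc b =>
      simp only [Int.lor, pvEmodNegSucc]
      have h := pvLandMod a b
      rcases Nat.mod_two_eq_zero_or_one (a &&& b) with hx | hx <;>
      rcases Nat.mod_two_eq_zero_or_one a with ha | ha <;>
      rcases Nat.mod_two_eq_zero_or_one b with hb | hb <;>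
        rw [hx, ha, hb] at h ⊢ <;> simp at h ⊢

-- low bit of x mod 2^(m+1) is the low bit of x
theorem pvModPar (x : Int) (m : Nat) :
    PySem.Int.mod (PySem.Int.mod x ((2^(m+1) : Nat) : Int)) 2 = PySem.Int.mod x 2 := by
  rw [PySem.Int.mod_eq_emod_of_pos (by positivity), PySem.Int.mod_eq_emod_of_pos (by norm_num),
      PySem.Int.mod_eq_emod_of_pos (by norm_num)]
  apply Int.emod_emod_of_dvd
  exact ⟨((2^m : Nat) : Int), by push_cast [pow_succ]; ring⟩

-- halving x mod 2^(m+1) is (x // 2) mod 2^m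
theorem pvModDiv (x : Int) (m : Nat) :
    (PySem.Int.mod x ((2^(m+1) : Nat) : Int)) / 2
      = PySem.Int.mod (PySem.Int.floordiv x 2) ((2^m : Nat) : Int) := by
  rw [PySem.Int.mod_eq_emod_of_pos (by positivity), PySem.Int.mod_eq_emod_of_pos (by positivity),
      PySem.Int.floordiv_eq_ediv_of_pos (by norm_num)]
  have hPpos : (0 : Int) < ((2^m : Nat) : Int) := by positivity
  have h2P : ((2^(m+1) : Nat) : Int) = 2 * ((2^m : Nat) : Int) := by push_cast [pow_succ]; ring
  set P : Int := ((2^m : Nat) : Int)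
  rw [h2P]
  have hq := Int.emod_add_mul_ediv x (2*P)
  set r := x % (2*P) with hr
  have hr0 : 0 ≤ r := Int.emod_nonneg x (by positivity)
  have hrlt : r < 2*P := Int.emod_lt_of_pos x (by positivity)
  have hx2 : x / 2 = r / 2 + P * (x / (2*P)) := by
    have hx : x = r + (P * (x / (2*P))) * 2 := by linarith [hq]
    conv_lhs => rw [hx]
    rw [Int.add_mul_ediv_right _ _ (by norm_num : (2:Int) ≠ 0)]
  rw [hx2, Int.add_mul_emod_self_left]
  exact (Int.emod_eq_of_lt (by omega) (by omega)).symm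

-- single-character str.replace is a character map
theorem pvReplGo (a b : Char) (fuel : Nat) : ∀ (s acc : List Char), s.length ≤ fuel →
    PySem.Chars.replace.go [a] [b] fuel s acc
      = acc.reverse ++ s.map (fun c => if c = a then b else c) := by
  induction fuel with
  | zero =>
    intro s acc h
    cases s with
    | nil => simp [PySem.Chars.replace.go]
    | cons c t => simp at h
  | succ f ih =>
    intro s acc h
    cases s with
    | nil => simp [PySem.Chars.replace.go]
    | cons c t =>
      simp only [PySem.Chars.replace.go]
      by_cases hc : a = c
      · subst hc
        rw [if_pos (by simp [List.isPrefixOf])]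
        simp only [List.length_cons] at h
        rw [ih (List.drop [a].length (a :: t)) ([b].reverse ++ acc) (by simp; omega)]
        simp
      · rw [if_neg (by simp [List.isPrefixOf]; exact fun hh => hc hh)]
        simp only [List.length_cons] at h
        rw [ih t (c :: acc) (by omega)]
        simp [if_neg (fun hh : c = a => hc hh.symm)]

theorem pvReplaceMap (a b : Char) (s : List Char) :
    PySem.Chars.replace s [a] [b] = s.map (fun c => if c = a then b else c) := by
  rw [PySem.Chars.replace]
  rw [if_neg (by simp)]
  rw [pvReplGo a b s.length s [] (le_refl _)]
  simp

def pvLsb : Nat → Int → Int → List Char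
  | 0, _, _ => []
  | m + 1, i, j =>
      (if PySem.Int.mod i 2 + PySem.Int.mod j 2 > 0 then '#' else ' ') ::
        pvLsb m (PySem.Int.floordiv i 2) (PySem.Int.floordiv j 2)

def pvPadH : Nat → Nat → List Char
  | 0, _ => []
  | m + 1, w => pvPadH m (w / 2) ++ [if w % 2 = 1 then '#' else ' ']

def pvPadBits : Nat → Nat → List Char
  | 0, _ => []
  | m + 1, w => pvPadBits m (w / 2) ++ [if w % 2 = 1 then '1' else '0']

theorem pvPadZero (m : Nat) : pvPadBits m 0 = List.replicate m '0' := by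
  induction m with
  | zero => rfl
  | succ m ih => rw [pvPadBits, List.replicate_succ']; simp [ih]

theorem pvDigitChar (v : Nat) : (v % 2).digitChar = if v % 2 = 1 then '1' else '0' := by
  rcases Nat.mod_two_eq_zero_or_one v with h | h <;> rw [h] <;> rfl

theorem pvPadLemma (m : Nat) : ∀ v : Nat, 0 < m → v < 2^m →
    List.replicate (m - (Nat.toDigits 2 v).length) '0' ++ Nat.toDigits 2 v = pvPadBits m v := by
  induction m with
  | zero => intro v h; omega
  | succ m ih =>
    intro v _ hv
    by_cases h2 : v < 2
    · rw [Nat.toDigits_of_lt_base h2]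
      rw [pvPadBits]
      have hv2 : v / 2 = 0 := by omega
      rw [hv2, pvPadZero]
      have hd : v.digitChar = (if v % 2 = 1 then '1' else '0') := by
        interval_cases v <;> rfl
      simp only [List.length_singleton, Nat.add_sub_cancel, hd]
    · have hm : 0 < m := by
        rcases Nat.eq_zero_or_pos m with h0 | h0
        · subst h0; norm_num at hv; omega
        · exact h0
      have hv2 : v / 2 < 2^m := by
        rw [Nat.div_lt_iff_lt_mul (by norm_num)]
        calc v < 2^(m+1) := hv
        _ = 2^m * 2 := by rw [pow_succ]
      have ihv := ih (v / 2) hm hv2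
      rw [Nat.toDigits_eq_if (by norm_num), if_neg (by omega)]
      rw [pvPadBits, List.length_append, List.length_singleton]
      have hsub : m + 1 - ((Nat.toDigits 2 (v / 2)).length + 1) = m - (Nat.toDigits 2 (v / 2)).length := by
        omega
      rw [hsub, ← List.append_assoc, ihv, pvDigitChar]

theorem pvToBinNonneg (v : Int) (h : 0 ≤ v) :
    PySem.Int.toBinChars v = Nat.toDigits 2 v.toNat := by
  rw [PySem.Int.toBinChars, if_neg (by omega)]

theorem pvZfillEq (c : Char) (rest : List Char) (h1 : ¬(c = '+' ∨ c = '-')) (w : Int) :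
    PySem.Chars.zfill (c :: rest) w
      = List.replicate (w.toNat - (c :: rest).length) '0' ++ (c :: rest) := by
  rw [PySem.Chars.zfill]
  by_cases hw : w ≤ ((c :: rest).length : Int)
  · rw [if_pos hw]
    have h0 : w.toNat - (c :: rest).length = 0 := by
      simp only [List.length_cons] at hw ⊢; omega
    rw [h0]
    simp
  · rw [if_neg hw, if_neg h1]

theorem pvMapPad (m : Nat) : ∀ w : Nat,
    ((pvPadBits m w).map (fun c => if c = '1' then '#' else c)).map
        (fun c => if c = '0' then ' ' else c) = pvPadH m w := by
  induction m with
  | zero => intro w; rfl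
  | succ m ih =>
    intro w
    rw [pvPadBits, pvPadH, List.map_append, List.map_append, ih]
    by_cases hw : w % 2 = 1 <;> simp [hw]

-- A's lsb-first row, reversed, is B's msb-first rendering of (i|j) mod 2^m
theorem pvLsbRev (m : Nat) : ∀ i j : Int,
    (pvLsb m i j).reverse
      = pvPadH m ((PySem.Int.mod (PySem.Int.bor i j) ((2^m : Nat) : Int)).toNat) := by
  induction m with
  | zero => intro i j; rfl
  | succ m ih =>
    intro i j
    simp only [pvLsb, List.reverse_cons]
    rw [ih, pvPadH]
    have hr0 : 0 ≤ PySem.Int.mod (PySem.Int.bor i j) ((2^(m+1) : Nat) : Int) :=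
      PySem.Int.mod_nonneg _ (by positivity)
    have hdiv : (PySem.Int.mod (PySem.Int.bor i j) ((2^(m+1) : Nat) : Int)).toNat / 2
        = (PySem.Int.mod (PySem.Int.bor (PySem.Int.floordiv i 2) (PySem.Int.floordiv j 2))
            ((2^m : Nat) : Int)).toNat := by
      rw [← pvBorDiv, ← pvModDiv]
      set R := PySem.Int.mod (PySem.Int.bor i j) ((2^(m+1) : Nat) : Int) with hR
      omega
    have hpar : ((PySem.Int.mod (PySem.Int.bor i j) ((2^(m+1) : Nat) : Int)).toNat % 2 = 1)
        ↔ (0 < PySem.Int.mod i 2 + PySem.Int.mod j 2) := by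
      rw [← pvBorMod i j]
      have hmp := pvModPar (PySem.Int.bor i j) m
      have hb0 : 0 ≤ PySem.Int.mod (PySem.Int.bor i j) 2 := PySem.Int.mod_nonneg _ (by norm_num)
      have hb2 : PySem.Int.mod (PySem.Int.bor i j) 2 < 2 := PySem.Int.mod_lt _ (by norm_num)
      set R := PySem.Int.mod (PySem.Int.bor i j) ((2^(m+1) : Nat) : Int) with hR
      set c := PySem.Int.mod (PySem.Int.bor i j) 2 with hc
      rw [PySem.Int.mod_eq_emod_of_pos (by norm_num)] at hmp
      omega
    rw [hdiv]
    congr 1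
    by_cases hc : 0 < PySem.Int.mod i 2 + PySem.Int.mod j 2
    · rw [if_pos hc, if_pos (hpar.mpr hc)]
    · rw [if_neg hc, if_neg (fun hh => hc (hpar.mp hh))]

-- A's inner loop computes pvLsb
theorem pvRowFold (l : List Int) : ∀ (i j : Int) (acc : List Char),
    (l.foldl
      (fun (st : List Char × Int × Int) (_ : Int) =>
        (st.1 ++ [if PySem.Int.mod st.2.1 2 + PySem.Int.mod st.2.2 2 > 0 then '#' else ' '],
         PySem.Int.floordiv st.2.1 2, PySem.Int.floordiv st.2.2 2)) (acc, i, j)).1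
    = acc ++ pvLsb l.length i j := by
  induction l with
  | nil => intro i j acc; simp [pvLsb]
  | cons x xs ih =>
    intro i j acc
    simp only [List.foldl_cons, List.length_cons]
    rw [ih, pvLsb]
    simp

theorem pvRangeUpLen (n : Int) : (PySem.List.pyRange 0 n 1).length = n.toNat := by
  simp only [PySem.List.pyRange]
  rw [if_neg (by norm_num : ¬(1:Int) = 0)]
  simp only [List.length_map, List.length_range]
  rw [if_pos (by norm_num : (0:Int) < 1)]
  by_cases h : (0:Int) < n
  · rw [if_pos h]; omega
  · rw [if_neg h]; omega

theorem pvShiftOne (m : Nat) : ((1:Int) <<< m) = ((2^m : Nat) : Int) := by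
  rw [Int.shiftLeft_eq]
  push_cast
  ring

theorem solution_eq (n : Int) (arr1 arr2 : List Int) : solution n arr1 arr2 = solution_alt n arr1 arr2 := by
  unfold solution solution_alt
  rw [PySem.List.foldl_append_singleton_eq_map
    (fun p : Int × Int => String.mk
      (((PySem.List.pyRange 0 n 1).foldl
        (fun (st : List Char × Int × Int) (_ : Int) =>
          (st.1 ++ [if PySem.Int.mod st.2.1 2 + PySem.Int.mod st.2.2 2 > 0 then '#' else ' '],
           PySem.Int.floordiv st.2.1 2, PySem.Int.floordiv st.2.2 2))
        (([] : List Char), p.1, p.2)).1.reverse))]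
  rw [PySem.List.foldl_append_singleton_eq_map
    (fun p : Int × Int => String.mk
      (PySem.Chars.replace
        (PySem.Chars.replace
          (if n > 0 then
            PySem.Chars.zfill
              (PySem.Int.toBinChars (PySem.Int.mod (PySem.Int.bor p.1 p.2) ((1 : Int) <<< n.toNat))) n
          else []) ['1'] ['#']) ['0'] [' ']))]
  simp only [List.nil_append]
  apply List.map_congr_left
  intro p _
  rw [pvRowFold, List.nil_append, pvRangeUpLen, pvLsbRev]
  congr 1
  by_cases hn : n > 0
  · rw [if_pos hn, pvShiftOne]
    set v := PySem.Int.mod (PySem.Int.bor p.1 p.2) ((2^n.toNat : Nat) : Int) with hv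
    have hv0 : 0 ≤ v := PySem.Int.mod_nonneg _ (by positivity)
    have hvlt : v < ((2^n.toNat : Nat) : Int) := PySem.Int.mod_lt _ (by positivity)
    rw [pvToBinNonneg v hv0]
    obtain ⟨c, rest, hcr⟩ : ∃ c rest, Nat.toDigits 2 v.toNat = c :: rest := by
      rcases hl : Nat.toDigits 2 v.toNat with _ | ⟨c, rest⟩
      · exfalso
        have := Nat.length_toDigits_pos (b := 2) (n := v.toNat)
        simp [hl] at this
      · exact ⟨c, rest, rfl⟩
    have hdig : c.isDigit = true := by
      exact Nat.isDigit_of_mem_toDigits (b := 2) (n := v.toNat) (by norm_num) (by norm_num)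
        (by rw [hcr]; exact List.mem_cons_self)
    have hpm : ¬(c = '+' ∨ c = '-') := by
      rintro (h | h) <;> subst h <;> simp [Char.isDigit] at hdig
    rw [hcr, pvZfillEq c rest hpm n, ← hcr]
    rw [pvPadLemma n.toNat v.toNat (by omega) (by omega)]
    rw [pvReplaceMap, pvReplaceMap, pvMapPad]
  · rw [if_neg hn]
    have h0 : n.toNat = 0 := by omega
    rw [h0, pvReplaceMap, pvReplaceMap]
    rfl

-- ===== VERDICT =====
theorem solution_spec : Claim_equal_solution := by
  intro n arr1 arr2 _
  unfold Spec_solution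
  exact solution_eq n arr1 arr2
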